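-- pv_equiv track=rewrite | github.com/Chonapatcc/python-old | Project1 (ez)/bloggle.py | count
-- ===== SOURCE A (Python) =====
-- def count(x):
--     lis=list()
--     words=x.split(",")
--     for word in words:
--         dic=dict()
--         for letter in word:
--             dic[letter]=dic.get(letter,0)+1
--         lis.append(dic)
--     return lis
-- ===== SOURCE B (Python) =====
-- def count(x):
--     lis = []
--     dic = {}
--     for ch in x:
--         if ch == ',':
--             lis.append(dic)
--             dic = {}
--         else:
--             dic[ch] = dic.get(ch, 0) + 1
--     lis.append(dic)
--     return lis
-- ===== Notes on version B (the rewrite author's own statement) =====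
-- stated objective: alternative
-- what changed: Replaces the split-into-words pass plus a per-word counting loop by a single-pass state machine over the raw string that maintains the current frequency dict and flushes it to the output list at each separator, never materialising the word list.
import Mathlib
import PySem

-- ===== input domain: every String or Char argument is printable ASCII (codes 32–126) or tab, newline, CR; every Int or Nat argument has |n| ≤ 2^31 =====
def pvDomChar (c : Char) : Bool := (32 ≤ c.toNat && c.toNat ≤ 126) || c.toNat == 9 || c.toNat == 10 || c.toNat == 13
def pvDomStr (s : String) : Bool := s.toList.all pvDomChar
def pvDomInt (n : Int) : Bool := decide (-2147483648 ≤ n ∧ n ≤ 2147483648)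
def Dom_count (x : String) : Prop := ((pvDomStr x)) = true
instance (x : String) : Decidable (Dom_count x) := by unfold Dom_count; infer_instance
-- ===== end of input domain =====

-- B replaces A's split-into-words pass + per-word counting loop by a single pass over the raw string that
-- flushes the running frequency dict at each separator; same return value.

-- ===== PORT A =====
-- x.split(",") is PySem.Chars.splitOn on the code points (sep ≠ "", exact); iterating a Python
-- string yields its characters as 1-char strings, ported as String.singleton letter.
def count (x : String) : List (List (String × Int)) :=
  (PySem.Chars.splitOn x.toList [',']).foldl
    (fun lis word =>
      lis ++ [(word.foldl
        (fun dic letter =>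
          dic.insert (String.singleton letter) (dic.getD (String.singleton letter) 0 + 1))
        PySem.Dict.empty).items])
    []

-- ===== PORT B =====
-- one pass over the characters; state = (flushed dicts so far, current dict); final flush at the end.
def count_alt (x : String) : List (List (String × Int)) :=
  let st := x.toList.foldl
    (fun (st : List (PySem.Dict String Int) × PySem.Dict String Int) ch =>
      if ch = ',' then (st.1 ++ [st.2], PySem.Dict.empty)
      else (st.1, st.2.insert (String.singleton ch) (st.2.getD (String.singleton ch) 0 + 1)))
    ([], PySem.Dict.empty)
  (st.1 ++ [st.2]).map (·.items)

-- ===== PRECONDITION & SPEC =====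
def Spec_count (x : String) (out : List (List (String × Int))) : Prop := out = count_alt x
instance (x : String) (out : List (List (String × Int))) : Decidable (Spec_count x out) := by unfold Spec_count; infer_instance

-- ===== CLAIM (what is proved, stated in full; the proofs are below) =====
def Claim_equal_count : Prop := ∀ (x : String), Dom_count x → Spec_count x (count x)

-- ===== LEMMAS AND PROOFS =====

-- simple recursive characterisation of split on the single character ','
def split1 : List Char → List (List Char)
  | [] => [[]]
  | c :: rest => if c = ',' then [] :: split1 rest else (split1 rest).modifyHead (c :: ·)

lemma split1_ne_nil (l : List Char) : split1 l ≠ [] := by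
  induction l with
  | nil => simp [split1]
  | cons c rest ih =>
    simp only [split1]
    split_ifs
    · simp
    · cases h : split1 rest with
      | nil => exact absurd h ih
      | cons w ws => simp [List.modifyHead]

lemma splitOn_go_eq (l : List Char) (fuel : Nat) (cur : List Char) (acc : List (List Char))
    (h : l.length ≤ fuel) :
    PySem.Chars.splitOn.go [','] fuel l cur acc
      = acc.reverse ++ (split1 l).modifyHead (cur.reverse ++ ·) := by
  induction fuel generalizing l cur acc with
  | zero =>
    have : l = [] := List.eq_nil_of_length_eq_zero (Nat.le_zero.mp h)
    subst this
    simp [PySem.Chars.splitOn.go, split1, List.modifyHead]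
  | succ fuel ih =>
    cases l with
    | nil => simp [PySem.Chars.splitOn.go, split1, List.modifyHead]
    | cons c rest =>
      rw [PySem.Chars.splitOn.go]
      by_cases hc : c = ','
      · subst hc
        have hp : List.isPrefixOf [','] (',' :: rest) = true := by
          simp [List.isPrefixOf]
        simp only [hp, if_true, List.length_cons, List.length_nil, List.drop_succ_cons, List.drop_zero]
        rw [ih rest [] (List.reverse cur :: acc) (by simpa using Nat.lt_succ_iff.mp (by simpa using h))]
        have h1 : split1 (',' :: rest) = [] :: split1 rest := by simp [split1]
        rw [h1]
        cases hs : split1 rest with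
        | nil => exact absurd hs (split1_ne_nil rest)
        | cons w ws => simp [List.modifyHead]
      · have hp : List.isPrefixOf [','] (c :: rest) = false := by
          simp [List.isPrefixOf, BEq.beq]
          exact fun hh => hc hh.symm
        rw [if_neg (by simp [hp])]
        rw [ih rest (c :: cur) acc (by simpa using Nat.lt_succ_iff.mp (by simpa using h))]
        simp only [split1, if_neg hc]
        congr 1
        cases hs : split1 rest with
        | nil => exact absurd hs (split1_ne_nil rest)
        | cons w ws => simp [List.modifyHead]

lemma splitOn_eq_split1 (l : List Char) :
    PySem.Chars.splitOn l [','] = split1 l := by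
  rw [PySem.Chars.splitOn, splitOn_go_eq l (l.length + 1) [] [] (by omega)]
  cases hs : split1 l with
  | nil => exact absurd hs (split1_ne_nil l)
  | cons w ws => simp [List.modifyHead]

-- the per-word dict builder (shared body of both ports' inner step)
def dstep (dic : PySem.Dict String Int) (ch : Char) : PySem.Dict String Int :=
  dic.insert (String.singleton ch) (dic.getD (String.singleton ch) 0 + 1)

-- what B's state yields, expressed over split1's parts (head still carries the running dict)
def mapDicts (dic : PySem.Dict String Int) : List (List Char) → List (PySem.Dict String Int)
  | [] => []
  | w :: ws => w.foldl dstep dic :: ws.map (fun w => w.foldl dstep PySem.Dict.empty)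

lemma bstate_eq (l : List Char) (lis : List (PySem.Dict String Int)) (dic : PySem.Dict String Int) :
    ((l.foldl
        (fun (st : List (PySem.Dict String Int) × PySem.Dict String Int) ch =>
          if ch = ',' then (st.1 ++ [st.2], PySem.Dict.empty)
          else (st.1, dstep st.2 ch)) (lis, dic)).1
      ++ [(l.foldl
        (fun (st : List (PySem.Dict String Int) × PySem.Dict String Int) ch =>
          if ch = ',' then (st.1 ++ [st.2], PySem.Dict.empty)
          else (st.1, dstep st.2 ch)) (lis, dic)).2])
      = lis ++ mapDicts dic (split1 l) := by
  induction l generalizing lis dic with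
  | nil => simp [mapDicts, split1, dstep]
  | cons c rest ih =>
    by_cases hc : c = ','
    · subst hc
      simp only [List.foldl_cons, if_true]
      rw [ih]
      simp only [split1, mapDicts, List.append_assoc,
        List.singleton_append]
      congr 1
      cases hs : split1 rest with
      | nil => exact absurd hs (split1_ne_nil rest)
      | cons w ws => simp
    · simp only [List.foldl_cons, if_neg hc]
      rw [ih]
      congr 1
      simp only [split1, if_neg hc]
      cases hs : split1 rest with
      | nil => exact absurd hs (split1_ne_nil rest)
      | cons w ws => simp [mapDicts, List.modifyHead]

-- ===== VERDICT (by name: the statement is the Claim_ definition above) =====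
theorem count_spec : Claim_equal_count := by
  intro x _
  unfold Spec_count count count_alt
  rw [PySem.List.foldl_append_singleton_eq_map]
  simp only [List.nil_append, splitOn_eq_split1]
  have hb := bstate_eq x.toList [] PySem.Dict.empty
  simp only [dstep] at hb
  rw [hb]
  simp only [List.nil_append]
  cases hs : split1 x.toList with
  | nil => exact absurd hs (split1_ne_nil x.toList)
  | cons w ws =>
    simp only [mapDicts, List.map_cons, List.map_map]
    rfl
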